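-- pv_equiv track=rewrite | github.com/linelie00/project-OPW | crypto/randomNumber/2.py | linear_congruence_method
-- ===== SOURCE A (Python) =====
-- def linear_congruence_method(a, c, m, seed, max=50):
--     result = []
--     r = seed
--
--     for _ in range(max):
--         r = (a * r + c) % m
--         result.append(r)
--
--     for i in range(1, len(result) // 2 + 1):
--         pattern = result[:i]
--         count = 0
--
--         for j in range(0, len(result) - i + 1, i):
--             if result[j:j+i] == pattern:
--                 count += 1
--             else:
--                 break
--
--         if count >= 3:
--             return result, pattern
--
--     return result, []
-- ===== SOURCE B (Python) =====
-- def linear_congruence_method(a, c, m, seed, max=50):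
--     seq = []
--     r = seed
--     for _ in range(max):
--         r = (a * r + c) % m
--         seq.append(r)
--     n = len(seq)
--     i = next((i for i in range(1, n // 3 + 1) if seq[:2 * i] == seq[i:3 * i]), None)
--     return seq, ([] if i is None else seq[:i])
-- ===== Notes on version B (the rewrite author's own statement) =====
-- stated objective: simpler
-- what changed: Replaces A's counting inner loop (blocks compared one by one with a break) by the direct criterion 'seq[:2*i] == seq[i:3*i]' scanned over i in range(1, n//3+1) with next(); the inner loop, the counter and the break disappear.
import Mathlib
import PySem

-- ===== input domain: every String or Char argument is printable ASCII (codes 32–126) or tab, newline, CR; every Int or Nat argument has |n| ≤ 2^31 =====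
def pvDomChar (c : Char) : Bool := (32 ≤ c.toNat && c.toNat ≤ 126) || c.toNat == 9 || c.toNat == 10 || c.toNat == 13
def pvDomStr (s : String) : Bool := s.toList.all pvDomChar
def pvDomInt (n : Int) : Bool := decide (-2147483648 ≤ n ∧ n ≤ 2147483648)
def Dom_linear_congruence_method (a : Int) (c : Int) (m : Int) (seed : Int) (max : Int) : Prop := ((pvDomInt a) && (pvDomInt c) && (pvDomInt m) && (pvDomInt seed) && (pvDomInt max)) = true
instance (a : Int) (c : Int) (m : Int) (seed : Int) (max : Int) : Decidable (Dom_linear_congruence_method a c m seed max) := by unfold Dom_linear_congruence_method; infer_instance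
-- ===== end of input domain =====

-- B replaces A's counting inner loop by the direct prefix criterion seq[:2*i] == seq[i:3*i] over i ≤ n//3 (simpler; same asymptotic cost).


-- ===== PORT A =====
-- inner loop: for j in range(0, len(result)-i+1, i): count blocks equal to pattern, break at first mismatch
def lcmInnerA (result pattern : List Int) (i : Int) : List Int → Int → Int
  | [], count => count
  | j :: js, count =>
      if PySem.List.slice result (some j) (some (j + i)) = pattern then
        lcmInnerA result pattern i js (count + 1)
      else count

-- outer loop: for i in range(1, len(result)//2+1): early return on count >= 3
def lcmOuterA (result : List Int) : List Int → List Int × List Int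
  | [] => (result, [])
  | i :: is =>
      let pattern := PySem.List.slice result none (some i)
      let count := lcmInnerA result pattern i
        (PySem.List.pyRange 0 (PySem.List.len result - i + 1) i) 0
      if 3 ≤ count then (result, pattern) else lcmOuterA result is

def linear_congruence_method (a : Int) (c : Int) (m : Int) (seed : Int) (max : Int) : List Int × List Int :=
  let st := (PySem.List.pyRange 0 max 1).foldl
    (fun (st : List Int × Int) _ =>
      let r := PySem.Int.mod (a * st.2 + c) m
      (st.1 ++ [r], r)) ([], seed)
  let result := st.1
  lcmOuterA result (PySem.List.pyRange 1 (PySem.Int.floordiv (PySem.List.len result) 2 + 1) 1)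

-- ===== PORT B =====
-- next((i for i in range(1, n//3+1) if seq[:2*i] == seq[i:3*i]), None)
def lcmFindB (seq : List Int) : List Int → Option Int
  | [] => none
  | i :: is =>
      if PySem.List.slice seq none (some (2 * i)) = PySem.List.slice seq (some i) (some (3 * i)) then
        some i
      else lcmFindB seq is

def linear_congruence_method_alt (a : Int) (c : Int) (m : Int) (seed : Int) (max : Int) : List Int × List Int :=
  let st := (PySem.List.pyRange 0 max 1).foldl
    (fun (st : List Int × Int) _ =>
      let r := PySem.Int.mod (a * st.2 + c) m
      (st.1 ++ [r], r)) ([], seed)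
  let seq := st.1
  match lcmFindB seq (PySem.List.pyRange 1 (PySem.Int.floordiv (PySem.List.len seq) 3 + 1) 1) with
  | none => (seq, [])
  | some i => (seq, PySem.List.slice seq none (some i))

-- ===== PRECONDITION & SPEC =====
-- A raises ZeroDivisionError iff m = 0 and the generation loop runs (max ≥ 1); Pre_ excludes exactly those inputs.
def Pre_linear_congruence_method (a : Int) (c : Int) (m : Int) (seed : Int) (max : Int) : Prop :=
  m ≠ 0 ∨ max ≤ 0
instance (a : Int) (c : Int) (m : Int) (seed : Int) (max : Int) : Decidable (Pre_linear_congruence_method a c m seed max) := by unfold Pre_linear_congruence_method; infer_instance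

def pvWitness_linear_congruence_method : Int × Int × Int × Int × Int := (5, 3, 16, 7, 12)

def Spec_linear_congruence_method (a : Int) (c : Int) (m : Int) (seed : Int) (max : Int) (out : List Int × List Int) : Prop := out = linear_congruence_method_alt a c m seed max
instance (a : Int) (c : Int) (m : Int) (seed : Int) (max : Int) (out : List Int × List Int) : Decidable (Spec_linear_congruence_method a c m seed max out) := by unfold Spec_linear_congruence_method; infer_instance

-- ===== CLAIM (what is proved, stated in full; the proofs are below) =====
def Claim_equal_linear_congruence_method : Prop := ∀ (a : Int) (c : Int) (m : Int) (seed : Int) (max : Int), Dom_linear_congruence_method a c m seed max → Pre_linear_congruence_method a c m seed max → Spec_linear_congruence_method a c m seed max (linear_congruence_method a c m seed max)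

-- ===== LEMMAS AND PROOFS =====

-- the inner loop never decreases the counter
lemma lcmInnerA_ge (result pattern : List Int) (i : Int) (js : List Int) (count : Int) :
    count ≤ lcmInnerA result pattern i js count := by
  induction js generalizing count with
  | nil => simp [lcmInnerA]
  | cons j js ih =>
      simp only [lcmInnerA]
      split
      · exact le_trans (by omega) (ih (count + 1))
      · exact le_refl _

-- the inner loop adds at most one per list element
lemma lcmInnerA_le (result pattern : List Int) (i : Int) (js : List Int) (count : Int) :
    lcmInnerA result pattern i js count ≤ count + js.length := by
  induction js generalizing count with
  | nil => simp [lcmInnerA]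
  | cons j js ih =>
      simp only [lcmInnerA, List.length_cons]
      split
      · exact le_trans (ih (count + 1)) (by push_cast; omega)
      · push_cast; omega

-- pure list fact: "first three blocks of length t agree" = "prefix of length 2t repeats at offset t"
lemma three_blocks (seq : List Int) (t : Nat) (h3 : 3 * t ≤ seq.length) :
    ((seq.drop t).take t = seq.take t ∧ (seq.drop (2 * t)).take t = seq.take t)
      ↔ seq.take (2 * t) = (seq.drop t).take (2 * t) := by
  have e1 : seq.take (2 * t) = seq.take t ++ (seq.drop t).take t := by
    rw [two_mul, List.take_add]
  have e2 : (seq.drop t).take (2 * t) = (seq.drop t).take t ++ (seq.drop (2 * t)).take t := by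
    rw [two_mul, List.take_add, List.drop_drop, ← two_mul]
  constructor
  · rintro ⟨hy, hz⟩
    rw [e1, e2, hy, hz]
  · intro h
    rw [e1, e2] at h
    have hlen : (seq.take t).length = ((seq.drop t).take t).length := by
      simp only [List.length_take, List.length_drop]
      omega
    obtain ⟨h1, h2⟩ := List.append_inj h hlen
    exact ⟨h1.symm, h2.symm.trans h1.symm⟩

-- characterization of A's inner count when the third block fits
lemma countA_iff (seq : List Int) (i : Int) (h1 : 1 ≤ i) (h3 : 3 * i ≤ (seq.length : Int)) :
    3 ≤ lcmInnerA seq (PySem.List.slice seq none (some i)) i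
          (PySem.List.pyRange 0 (PySem.List.len seq - i + 1) i) 0
      ↔ PySem.List.slice seq none (some (2 * i)) = PySem.List.slice seq (some i) (some (3 * i)) := by
  obtain ⟨t, rfl⟩ : ∃ t : Nat, i = (t : Int) := ⟨i.toNat, (Int.toNat_of_nonneg (by omega)).symm⟩
  have ht1 : 1 ≤ t := by exact_mod_cast h1
  have ht3 : 3 * t ≤ seq.length := by exact_mod_cast h3
  -- the pattern is seq.take t
  have hpat : PySem.List.slice seq none (some (t : Int)) = seq.take t :=
    PySem.List.slice_to_natCast seq t
  -- the j-range starts 0, t, 2t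
  have hjs : PySem.List.pyRange 0 (PySem.List.len seq - (t : Int) + 1) (t : Int)
      = 0 :: (t : Int) :: ((t : Int) * 2) ::
          (List.range (seq.length / t - 3)).map (fun k => (0 : Int) + (t : Int) * ((3 + k : Nat) : Int)) := by
    rw [PySem.List.len_eq, PySem.List.pyRange_of_pos _ _ (by omega), if_pos (by omega)]
    have e : ((seq.length : Int) - t + 1 - 0 + t - 1) = (seq.length : Int) := by ring
    rw [e]
    have e2 : ((seq.length : Int) / (t : Int)).toNat = seq.length / t := by
      rw [← Int.natCast_div]
      exact Int.toNat_natCast _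
    rw [e2]
    have hK : 3 ≤ seq.length / t := (Nat.le_div_iff_mul_le (by omega)).2 (by omega)
    rw [show seq.length / t = 3 + (seq.length / t - 3) by omega, List.range_add, List.map_append]
    norm_num [List.range_succ]
  -- the three block conditions as take/drop
  have hc0 : PySem.List.slice seq (some 0) (some (0 + (t : Int))) = seq.take t := by
    rw [PySem.List.slice_zero_start, zero_add, PySem.List.slice_to_natCast]
  have hc2 : PySem.List.slice seq (some (t : Int)) (some ((t : Int) + (t : Int)))
      = (seq.drop t).take t := PySem.List.slice_natCast_add seq t t
  have hc3 : PySem.List.slice seq (some ((t : Int) * 2)) (some ((t : Int) * 2 + (t : Int)))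
      = (seq.drop (2 * t)).take t := by
    rw [show ((t : Int) * 2) = ((2 * t : Nat) : Int) by push_cast; ring]
    exact PySem.List.slice_natCast_add seq (2 * t) t
  -- the two slices on the B side
  have hb1 : PySem.List.slice seq none (some (2 * (t : Int))) = seq.take (2 * t) := by
    rw [show (2 * (t : Int)) = ((2 * t : Nat) : Int) by push_cast; ring,
        PySem.List.slice_to_natCast]
  have hb2 : PySem.List.slice seq (some (t : Int)) (some (3 * (t : Int)))
      = (seq.drop t).take (2 * t) := by
    rw [show (3 * (t : Int)) = ((3 * t : Nat) : Int) by push_cast; ring,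
        PySem.List.slice_natCast seq t (3 * t), show 3 * t - t = 2 * t by omega]
  rw [hpat, hjs, hb1, hb2, ← three_blocks seq t ht3]
  simp only [lcmInnerA]
  rw [if_pos hc0]
  by_cases hA : (seq.drop t).take t = seq.take t
  · rw [if_pos (hc2.trans hA)]
    by_cases hB : (seq.drop (2 * t)).take t = seq.take t
    · rw [if_pos (hc3.trans hB)]
      have := lcmInnerA_ge seq (seq.take t) (t : Int)
        ((List.range (seq.length / t - 3)).map (fun k => (0 : Int) + (t : Int) * ((3 + k : Nat) : Int)))
        (0 + 1 + 1 + 1)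
      constructor
      · intro _; exact ⟨hA, hB⟩
      · intro _; omega
    · rw [if_neg (fun h => hB (hc3.symm.trans h))]
      constructor
      · intro h; omega
      · rintro ⟨_, h⟩; exact absurd h hB
  · rw [if_neg (fun h => hA (hc2.symm.trans h))]
    constructor
    · intro h; omega
    · rintro ⟨h, _⟩; exact absurd h hA

-- when the third block does not fit, the count stays below 3
lemma countA_lt (seq : List Int) (i : Int) (h1 : 1 ≤ i) (h3 : (seq.length : Int) < 3 * i) :
    ¬ 3 ≤ lcmInnerA seq (PySem.List.slice seq none (some i)) i
          (PySem.List.pyRange 0 (PySem.List.len seq - i + 1) i) 0 := by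
  intro hge
  have hle := lcmInnerA_le seq (PySem.List.slice seq none (some i)) i
    (PySem.List.pyRange 0 (PySem.List.len seq - i + 1) i) 0
  have hlen : (PySem.List.pyRange 0 (PySem.List.len seq - i + 1) i).length ≤ 2 := by
    rw [PySem.List.len_eq, PySem.List.pyRange_of_pos _ _ (by omega)]
    simp only [List.length_map, List.length_range]
    split
    · have e : ((seq.length : Int) - i + 1 - 0 + i - 1) = (seq.length : Int) := by ring
      rw [e]
      have hd : (seq.length : Int) / i < 3 := (Int.ediv_lt_iff_lt_mul (by omega)).2 (by omega)
      omega
    · omega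
  omega

-- outer loop on candidates that all fail returns (seq, [])
lemma lcmOuterA_none (seq : List Int) (ts : List Int)
    (h : ∀ i ∈ ts, ¬ 3 ≤ lcmInnerA seq (PySem.List.slice seq none (some i)) i
          (PySem.List.pyRange 0 (PySem.List.len seq - i + 1) i) 0) :
    lcmOuterA seq ts = (seq, []) := by
  induction ts with
  | nil => rfl
  | cons i ts ih =>
      simp only [lcmOuterA]
      rw [if_neg (h i (by simp))]
      exact ih (fun j hj => h j (by simp [hj]))

-- A's scan over is ++ ts equals B's find over is, when every i in is fits and every i in ts fails
lemma outer_eq_find_aux (seq : List Int) (is ts : List Int)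
    (his : ∀ i ∈ is, 1 ≤ i ∧ 3 * i ≤ (seq.length : Int))
    (hts : ∀ i ∈ ts, ¬ 3 ≤ lcmInnerA seq (PySem.List.slice seq none (some i)) i
          (PySem.List.pyRange 0 (PySem.List.len seq - i + 1) i) 0) :
    lcmOuterA seq (is ++ ts)
      = match lcmFindB seq is with
        | none => (seq, [])
        | some i => (seq, PySem.List.slice seq none (some i)) := by
  induction is with
  | nil => simpa [lcmFindB] using lcmOuterA_none seq ts hts
  | cons i is ih =>
      obtain ⟨h1, h3⟩ := his i (by simp)
      simp only [List.cons_append, lcmOuterA, lcmFindB]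
      by_cases hc : PySem.List.slice seq none (some (2 * i)) = PySem.List.slice seq (some i) (some (3 * i))
      · rw [if_pos ((countA_iff seq i h1 h3).2 hc), if_pos hc]
      · rw [if_neg (fun h => hc ((countA_iff seq i h1 h3).1 h)), if_neg hc]
        exact ih (fun j hj => his j (by simp [hj]))

-- the main per-sequence equivalence
lemma outer_eq_find (seq : List Int) :
    lcmOuterA seq (PySem.List.pyRange 1 (PySem.Int.floordiv (PySem.List.len seq) 2 + 1) 1)
      = match lcmFindB seq (PySem.List.pyRange 1 (PySem.Int.floordiv (PySem.List.len seq) 3 + 1) 1) with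
        | none => (seq, [])
        | some i => (seq, PySem.List.slice seq none (some i)) := by
  rw [PySem.List.len_eq,
      PySem.Int.floordiv_eq_ediv_of_pos (show (0:Int) < 2 by norm_num),
      PySem.Int.floordiv_eq_ediv_of_pos (show (0:Int) < 3 by norm_num),
      PySem.List.pyRange_one_append 1 ((seq.length : Int) / 3 + 1) ((seq.length : Int) / 2 + 1)
        (by omega) (by omega)]
  refine outer_eq_find_aux seq _ _ ?_ ?_
  · intro i hi
    rw [PySem.List.mem_pyRange_one] at hi
    exact ⟨by omega, by omega⟩
  · intro i hi
    rw [PySem.List.mem_pyRange_one] at hi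
    exact countA_lt seq i (by omega) (by omega)

-- ===== VERDICT (by name: the statement is the Claim_ definition above) =====
theorem linear_congruence_method_spec : Claim_equal_linear_congruence_method := by
  intro a c m seed max _ _
  unfold Spec_linear_congruence_method linear_congruence_method linear_congruence_method_alt
  exact outer_eq_find _
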